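-- pv_equiv track=rewrite | github.com/miciav/nanofaas | tools/controlplane/src/controlplane_tool/build_requests.py | build_module_selectors
-- ===== SOURCE A (Python) =====
-- def build_module_selectors(modules: list[str]) -> list[str]:
--     selectors: list[str] = []
--     module_count = len(modules)
--     for mask in range(1 << module_count):
--         selected = [
--             modules[bit]
--             for bit in range(module_count)
--             if (mask >> bit) & 1
--         ]
--         selectors.append(",".join(selected) if selected else "none")
--     return selectors
-- ===== SOURCE B (Python) =====
-- def build_module_selectors(modules: list[str]) -> list[str]:
--     # Incremental powerset doubling: no bit masks; same ordering as mask enumeration.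
--     subsets: list[list[str]] = [[]]
--     for m in modules:
--         subsets = subsets + [s + [m] for s in subsets]
--     return [",".join(s) if s else "none" for s in subsets]
-- ===== Notes on version B (the rewrite author's own statement) =====
-- stated objective: alternative
-- what changed: Replaced the bitmask enumeration (for each mask in range(2**n), scan all n bits to collect selected modules) by incremental powerset doubling: start from the list holding one empty subset and, for each module, append the copies extended with it; same subset order, no bit arithmetic.
import Mathlib
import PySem

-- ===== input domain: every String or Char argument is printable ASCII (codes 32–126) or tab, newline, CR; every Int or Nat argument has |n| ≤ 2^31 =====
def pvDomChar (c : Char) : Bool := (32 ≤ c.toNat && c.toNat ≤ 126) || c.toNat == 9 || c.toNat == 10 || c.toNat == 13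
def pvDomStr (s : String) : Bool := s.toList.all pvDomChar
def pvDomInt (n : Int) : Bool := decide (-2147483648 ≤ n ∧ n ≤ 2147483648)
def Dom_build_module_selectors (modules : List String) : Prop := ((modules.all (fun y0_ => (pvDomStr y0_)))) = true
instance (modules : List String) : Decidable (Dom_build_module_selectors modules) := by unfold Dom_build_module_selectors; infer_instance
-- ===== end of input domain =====

-- B replaces the bitmask powerset enumeration by incremental doubling (result := result ++ [s+[m]]),
-- a different decomposition with the same ordering; objective: alternative/simpler.


-- ===== PORT A =====
-- Literal port: for mask in range(1 << n): selected = [modules[bit] for bit in range(n) if (mask>>bit)&1].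
-- mask and bit are nonnegative here, so 'mask >>> bit.toNat' and PySem.Int.band are exact for Python's '>>' and '&';
-- modules[bit] with 0 ≤ bit < len(modules) is exact as pyGetD.
def build_module_selectors (modules : List String) : List String :=
  let module_count := modules.length
  (PySem.List.pyRange 0 ((1 : Int) <<< module_count) 1).foldl
    (fun selectors mask =>
      let selected := (PySem.List.pyRange 0 (module_count : Int) 1).foldl
        (fun acc bit =>
          if PySem.Int.band (mask >>> bit.toNat) 1 ≠ 0 then acc ++ [PySem.List.pyGetD modules bit ""] else acc)
        []
      selectors ++ [if selected ≠ [] then PySem.Str.join "," selected else "none"])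
    []

-- ===== PORT B =====
-- Literal port of Source B: powerset by doubling, then map join-or-"none".
def build_module_selectors_alt (modules : List String) : List String :=
  let subsets := modules.foldl (fun acc m => acc ++ acc.map (fun s => s ++ [m])) [[]]
  subsets.map (fun s => if s ≠ [] then PySem.Str.join "," s else "none")

-- ===== PRECONDITION & SPEC =====
def Spec_build_module_selectors (modules : List String) (out : List String) : Prop := out = build_module_selectors_alt modules
instance (modules : List String) (out : List String) : Decidable (Spec_build_module_selectors modules out) := by unfold Spec_build_module_selectors; infer_instance

-- ===== CLAIM (what is proved, stated in full; the proofs are below) =====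
def Claim_equal_build_module_selectors : Prop := ∀ (modules : List String), Dom_build_module_selectors modules → Spec_build_module_selectors modules (build_module_selectors modules)

-- ===== LEMMAS AND PROOFS =====

-- the subset A's inner loop selects for a (nonnegative) mask, over Nat
def selOf (modules : List String) (k : Nat) : List String :=
  ((List.range modules.length).filter (fun bit => k.testBit bit)).map (fun bit => modules.getD bit "")

theorem foldl_filter_snoc {α β : Type} (p : α → Bool) (f : α → β) :
    ∀ (xs : List α) (init : List β),
      xs.foldl (fun acc x => if p x then acc ++ [f x] else acc) init
        = init ++ (xs.filter p).map f := by
  intro xs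
  induction xs with
  | nil => simp
  | cons x xs ih =>
    intro init
    by_cases h : p x <;> simp [List.foldl_cons, h, ih]

theorem band_one_testBit (m j : Nat) : (PySem.Int.band (((m >>> j : Nat)) : Int) 1 ≠ 0) = (m.testBit j = true) := by
  rw [show (1 : Int) = ((1 : Nat) : Int) from rfl, PySem.Int.band_natCast]
  simp only [eq_iff_iff, ne_eq, Int.natCast_eq_zero]
  rw [Nat.and_one_is_mod, Nat.testBit_eq_decide_div_mod_eq, Nat.shiftRight_eq_div_pow]
  simp only [decide_eq_true_eq]
  omega

-- A's inner loop equals selOf on a Nat mask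
theorem innerA_eq_selOf (modules : List String) (k : Nat) :
    (PySem.List.pyRange 0 (modules.length : Int) 1).foldl
      (fun acc bit =>
        if PySem.Int.band (@HShiftRight.hShiftRight Int Nat Int Int.instHShiftRightNat ((k : Int)) bit.toNat) 1 ≠ 0
        then acc ++ [PySem.List.pyGetD modules bit ""] else acc)
      []
      = selOf modules k := by
  rw [PySem.List.pyRange_one, List.foldl_map]
  have hlen : (((modules.length : Int)) - 0).toNat = modules.length := by omega
  rw [hlen]
  simp only [zero_add, Int.toNat_natCast, ← Int.natCast_shiftRight, PySem.List.pyGetD_natCast,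
    band_one_testBit]
  rw [foldl_filter_snoc (fun bit => k.testBit bit) (fun bit => modules.getD bit "")]
  simp [selOf]

theorem selOf_append_lo (ms : List String) (m : String) (k : Nat) (hk : k < 2 ^ ms.length) :
    selOf (ms ++ [m]) k = selOf ms k := by
  unfold selOf
  rw [List.length_append, List.length_singleton, List.range_succ, List.filter_append]
  have hbit : (List.filter (fun bit => k.testBit bit) [ms.length]) = [] := by
    simp [Nat.testBit_lt_two_pow hk]
  rw [hbit, List.append_nil]
  refine List.map_congr_left ?_
  intro b hb
  have hblt : b < ms.length := List.mem_range.mp (List.mem_of_mem_filter hb)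
  exact List.getD_append _ _ _ _ hblt

theorem selOf_append_hi (ms : List String) (m : String) (r : Nat) (hr : r < 2 ^ ms.length) :
    selOf (ms ++ [m]) (2 ^ ms.length + r) = selOf ms r ++ [m] := by
  unfold selOf
  rw [List.length_append, List.length_singleton, List.range_succ, List.filter_append]
  have htop : ((2 ^ ms.length + r).testBit ms.length) = true := by
    simp [Nat.testBit_two_pow_add_eq, Nat.testBit_lt_two_pow hr]
  have hbit : (List.filter (fun bit => (2 ^ ms.length + r).testBit bit) [ms.length]) = [ms.length] := by
    simp [htop]
  rw [hbit, List.map_append]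
  have hfil : List.filter (fun bit => (2 ^ ms.length + r).testBit bit) (List.range ms.length)
      = List.filter (fun bit => r.testBit bit) (List.range ms.length) := by
    refine List.filter_congr ?_
    intro b hb
    rw [Nat.testBit_two_pow_add_gt (List.mem_range.mp hb) r]
  rw [hfil]
  have hmap : (List.filter (fun bit => r.testBit bit) (List.range ms.length)).map
        (fun bit => (ms ++ [m]).getD bit "")
      = (List.filter (fun bit => r.testBit bit) (List.range ms.length)).map (fun bit => ms.getD bit "") := by
    refine List.map_congr_left ?_
    intro b hb
    exact List.getD_append _ _ _ _ (List.mem_range.mp (List.mem_of_mem_filter hb))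
  rw [hmap]
  have hlast : ([ms.length].map (fun bit => (ms ++ [m]).getD bit "")) = [m] := by
    simp [List.getD]
  rw [hlast]

-- the central equality: mask enumeration = incremental doubling
theorem masks_eq_doubling :
    ∀ ms : List String,
      (List.range (2 ^ ms.length)).map (selOf ms)
        = ms.foldl (fun acc m => acc ++ acc.map (fun s => s ++ [m])) [[]] := by
  intro ms
  induction ms using List.reverseRecOn with
  | nil => simp [selOf]
  | append_singleton ms m ih =>
    rw [List.length_append, List.length_singleton, pow_succ, mul_two, List.range_add,
        List.map_append, List.map_map]
    have h1 : (List.range (2 ^ ms.length)).map (selOf (ms ++ [m]))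
        = (List.range (2 ^ ms.length)).map (selOf ms) := by
      refine List.map_congr_left ?_
      intro k hk
      exact selOf_append_lo ms m k (List.mem_range.mp hk)
    have h2 : (List.range (2 ^ ms.length)).map (selOf (ms ++ [m]) ∘ fun x => 2 ^ ms.length + x)
        = ((List.range (2 ^ ms.length)).map (selOf ms)).map (fun s => s ++ [m]) := by
      rw [List.map_map]
      refine List.map_congr_left ?_
      intro r hr
      exact selOf_append_hi ms m r (List.mem_range.mp hr)
    rw [h1, h2, ih, List.foldl_append]
    simp

-- A as a map over Nat masks
theorem portA_eq_map (modules : List String) :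
    build_module_selectors modules
      = (List.range (2 ^ modules.length)).map
          (fun k => if selOf modules k ≠ [] then PySem.Str.join "," (selOf modules k) else "none") := by
  simp only [build_module_selectors]
  have houter : PySem.List.pyRange 0 ((1 : Int) <<< modules.length) 1
      = (List.range (2 ^ modules.length)).map (fun k : Nat => (k : Int)) := by
    rw [PySem.List.pyRange_one]
    have hpow : (((1 : Int) <<< modules.length) - 0).toNat = 2 ^ modules.length := by
      rw [show ((1 : Int) <<< modules.length) = ((1 <<< modules.length : Nat) : Int) from rfl,
        Nat.one_shiftLeft]
      rw [sub_zero, Int.toNat_natCast]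
    rw [hpow]
    simp [zero_add]
  rw [houter, List.foldl_map]
  simp only [innerA_eq_selOf]
  rw [PySem.List.foldl_append_singleton_eq_map
    (fun k : Nat => if selOf modules k ≠ [] then PySem.Str.join "," (selOf modules k) else "none")]
  simp

-- ===== VERDICT (by name: the statement is the Claim_ definition above) =====
theorem build_module_selectors_spec : Claim_equal_build_module_selectors := by
  intro modules _
  unfold Spec_build_module_selectors build_module_selectors_alt
  rw [portA_eq_map, ← masks_eq_doubling, List.map_map]
  rfl
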